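-- pv_equiv track=rewrite | github.com/suhjaesuk/codingtest.py | thisiscodingtest/P_떡볶이떡만들기_순차탐색.py | solve_cutter_height
-- ===== SOURCE A (Python) =====
-- def solve_cutter_height(required_rice_cake_height, rice_cake):
--     rice_cake.sort()
--     cutter = rice_cake[0]
--     while cutter <= rice_cake[-1]:
--         temp = 0
--         for i in rice_cake:
--             if cutter < i:
--                 temp = temp + (i - cutter)
--         if temp == required_rice_cake_height:
--             return cutter
--         cutter += 1
-- ===== SOURCE B (Python) =====
-- def solve_cutter_height(required_rice_cake_height, rice_cake):
--     lo = min(rice_cake)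
--     hi = max(rice_cake)
--     ans = None
--     while lo <= hi:
--         mid = (lo + hi) // 2
--         excess = 0
--         for h in rice_cake:
--             if mid < h:
--                 excess = excess + (h - mid)
--         if excess <= required_rice_cake_height:
--             ans = mid
--             hi = mid - 1
--         else:
--             lo = mid + 1
--     if ans is not None:
--         excess = 0
--         for h in rice_cake:
--             if ans < h:
--                 excess = excess + (h - ans)
--         if excess == required_rice_cake_height:
--             return ans
--     return None
-- ===== Notes on version B (the rewrite author's own statement) =====
-- stated objective: faster
-- what changed: Replaces A's sort plus linear scan of every integer cutter height from min to max (recomputing the excess sum at each height) by a binary search over [min,max] on the monotone non-increasing excess sum, with a final equality check; B does not sort or mutate the input.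
import Mathlib
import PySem

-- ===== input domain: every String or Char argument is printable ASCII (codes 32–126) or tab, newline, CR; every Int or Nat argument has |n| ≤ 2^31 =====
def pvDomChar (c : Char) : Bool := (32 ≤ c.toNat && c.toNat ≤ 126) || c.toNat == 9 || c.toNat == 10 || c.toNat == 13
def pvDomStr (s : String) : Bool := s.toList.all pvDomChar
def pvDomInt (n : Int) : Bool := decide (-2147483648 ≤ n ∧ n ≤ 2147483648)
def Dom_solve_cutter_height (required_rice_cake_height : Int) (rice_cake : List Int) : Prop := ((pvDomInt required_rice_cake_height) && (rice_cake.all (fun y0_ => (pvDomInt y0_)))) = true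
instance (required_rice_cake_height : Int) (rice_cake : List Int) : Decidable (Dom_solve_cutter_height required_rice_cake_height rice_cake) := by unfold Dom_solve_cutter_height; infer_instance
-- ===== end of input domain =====

-- B replaces A's linear scan of every cutter height by a binary search on the monotone excess
-- sum (objective: faster, asymptotically). A sorts its argument in place and B does not; the
-- equivalence proved here is about the RETURN value only.

-- ===== PORT A =====
-- the inner 'for i in rice_cake: if cutter < i: temp += i - cutter' loop
def excessA (cutter : Int) (xs : List Int) : Int :=
  xs.foldl (fun temp i => if cutter < i then temp + (i - cutter) else temp) 0

-- the 'while cutter <= rice_cake[-1]' loop; fuel = number of remaining candidate heights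
def loopA (req : Int) (s : List Int) (last : Int) (cutter : Int) : Nat → Option Int
  | 0 => none
  | fuel + 1 =>
    if cutter ≤ last then
      if excessA cutter s = req then some cutter
      else loopA req s last (cutter + 1) fuel
    else none

-- the body of A after the in-place 'rice_cake.sort()': index s[0] and s[-1], then the while loop
def solveSortedA (req : Int) (s : List Int) : Option Int :=
  match PySem.List.pyGet? s 0, PySem.List.pyGet? s (-1) with
  | some cutter, some last => loopA req s last cutter (last + 1 - cutter).toNat
  | _, _ => none  -- rice_cake[0] raises IndexError on the empty list (excluded by Pre_)

def solve_cutter_height (required_rice_cake_height : Int) (rice_cake : List Int) : Option Int :=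
  solveSortedA required_rice_cake_height (PySem.List.sorted rice_cake (fun x => x) false)

-- ===== PORT B =====
-- the inner 'for h in rice_cake: if mid < h: excess += h - mid' loop of Source B
def excessB (mid : Int) (xs : List Int) : Int :=
  xs.foldl (fun e h => if mid < h then e + (h - mid) else e) 0

-- the 'while lo <= hi' binary-search loop of Source B; fuel = size of the remaining interval
def bsearchB (req : Int) (rc : List Int) (lo hi : Int) (ans : Option Int) : Nat → Option Int
  | 0 => ans
  | fuel + 1 =>
    if lo ≤ hi then
      let mid := PySem.Int.floordiv (lo + hi) 2
      if excessB mid rc ≤ req then bsearchB req rc lo (mid - 1) (some mid) fuel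
      else bsearchB req rc (mid + 1) hi ans fuel
    else ans

def solve_cutter_height_alt (required_rice_cake_height : Int) (rice_cake : List Int) : Option Int :=
  match PySem.List.min? rice_cake (fun x => x), PySem.List.max? rice_cake (fun x => x) with
  | some lo, some hi =>
      match bsearchB required_rice_cake_height rice_cake lo hi none (hi + 1 - lo).toNat with
      | some a => if excessB a rice_cake = required_rice_cake_height then some a else none
      | none => none
  | _, _ => none  -- min() of an empty list raises ValueError (excluded by Pre_)

-- ===== PRECONDITION & SPEC =====
-- Pre_ excludes only the empty list, on which A raises IndexError (rice_cake[0]) and B raises ValueError (min of empty list).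
def Pre_solve_cutter_height (required_rice_cake_height : Int) (rice_cake : List Int) : Prop :=
  rice_cake ≠ []
instance (required_rice_cake_height : Int) (rice_cake : List Int) : Decidable (Pre_solve_cutter_height required_rice_cake_height rice_cake) := by unfold Pre_solve_cutter_height; infer_instance

def pvWitness_solve_cutter_height : Int × List Int := (6, [3, 2, 5, 1])

def Spec_solve_cutter_height (required_rice_cake_height : Int) (rice_cake : List Int) (out : Option Int) : Prop := out = solve_cutter_height_alt required_rice_cake_height rice_cake
instance (required_rice_cake_height : Int) (rice_cake : List Int) (out : Option Int) : Decidable (Spec_solve_cutter_height required_rice_cake_height rice_cake out) := by unfold Spec_solve_cutter_height; infer_instance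

-- ===== CLAIM (what is proved, stated in full; the proofs are below) =====
def Claim_equal_solve_cutter_height : Prop := ∀ (required_rice_cake_height : Int) (rice_cake : List Int), Dom_solve_cutter_height required_rice_cake_height rice_cake → Pre_solve_cutter_height required_rice_cake_height rice_cake → Spec_solve_cutter_height required_rice_cake_height rice_cake (solve_cutter_height required_rice_cake_height rice_cake)

-- ===== LEMMAS AND PROOFS =====

-- total excess cut off at height c, as a map-sum
def fsum (xs : List Int) (c : Int) : Int := (xs.map (fun h => max (h - c) 0)).sum

theorem excess_fold (c : Int) : ∀ (xs : List Int) (a : Int),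
    xs.foldl (fun t i => if c < i then t + (i - c) else t) a = a + fsum xs c := by
  intro xs
  induction xs with
  | nil => intro a; simp [fsum]
  | cons x t ih =>
      intro a
      simp only [List.foldl_cons]
      rw [ih]
      simp only [fsum, List.map_cons, List.sum_cons]
      by_cases h : c < x <;> simp [h] <;> omega

theorem excessA_eq (c : Int) (xs : List Int) : excessA c xs = fsum xs c := by
  simpa using excess_fold c xs 0

theorem excessB_eq (c : Int) (xs : List Int) : excessB c xs = fsum xs c := by
  simpa using excess_fold c xs 0

theorem fsum_perm {xs ys : List Int} (h : xs.Perm ys) (c : Int) : fsum xs c = fsum ys c :=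
  (h.map _).sum_eq

theorem fsum_antitone (xs : List Int) {c c' : Int} (h : c ≤ c') : fsum xs c' ≤ fsum xs c := by
  induction xs with
  | nil => simp [fsum]
  | cons x t ih =>
      simp only [fsum, List.map_cons, List.sum_cons] at *
      have : max (x - c') 0 ≤ max (x - c) 0 := by omega
      omega

-- "r is the least element of [lo,hi] satisfying P (none if there is none)"
def IsAns (lo hi : Int) (P : Int → Prop) : Option Int → Prop
  | some c => lo ≤ c ∧ c ≤ hi ∧ P c ∧ ∀ c', lo ≤ c' → c' < c → ¬ P c'
  | none => ∀ c, lo ≤ c → c ≤ hi → ¬ P c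

theorem IsAns_unique {lo hi : Int} {P : Int → Prop} {r₁ r₂ : Option Int}
    (h₁ : IsAns lo hi P r₁) (h₂ : IsAns lo hi P r₂) : r₁ = r₂ := by
  cases r₁ with
  | none =>
      cases r₂ with
      | none => rfl
      | some b => exact absurd h₂.2.2.1 (h₁ b h₂.1 h₂.2.1)
  | some a =>
      cases r₂ with
      | none => exact absurd h₁.2.2.1 (h₂ a h₁.1 h₁.2.1)
      | some b =>
          rcases lt_trichotomy a b with h | h | h
          · exact absurd h₁.2.2.1 (h₂.2.2.2 a h₁.1 h)
          · exact congrArg some h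
          · exact absurd h₂.2.2.1 (h₁.2.2.2 b h₂.1 h)

theorem IsAns_congr {lo hi : Int} {P Q : Int → Prop} {r : Option Int}
    (hPQ : ∀ c, P c ↔ Q c) (h : IsAns lo hi P r) : IsAns lo hi Q r := by
  cases r with
  | none => exact fun c h1 h2 hq => h c h1 h2 ((hPQ c).mpr hq)
  | some a =>
      exact ⟨h.1, h.2.1, (hPQ a).mp h.2.2.1,
        fun c' h1 h2 hq => h.2.2.2 c' h1 h2 ((hPQ c').mpr hq)⟩

theorem loopA_char (req : Int) (s : List Int) (last : Int) :
    ∀ (fuel : Nat) (cutter : Int), (last + 1 - cutter).toNat ≤ fuel →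
      IsAns cutter last (fun c => fsum s c = req) (loopA req s last cutter fuel) := by
  intro fuel
  induction fuel with
  | zero =>
      intro cutter hf
      have : last < cutter := by omega
      exact fun c h1 h2 _ => by omega
  | succ fuel ih =>
      intro cutter hf
      by_cases hle : cutter ≤ last
      · simp only [loopA, if_pos hle]
        by_cases heq : excessA cutter s = req
        · rw [excessA_eq] at heq
          simp only [excessA_eq, if_pos heq]
          exact ⟨le_refl _, hle, heq, fun c' h1 h2 _ => by omega⟩
        · rw [excessA_eq] at heq
          simp only [excessA_eq, if_neg heq]
          have hrec := ih (cutter + 1) (by omega)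
          cases hr : loopA req s last (cutter + 1) fuel with
          | none =>
              rw [hr] at hrec
              intro c h1 h2 hp
              rcases eq_or_lt_of_le h1 with h | h
              · exact heq (h ▸ hp)
              · exact hrec c (by omega) h2 hp
          | some a =>
              rw [hr] at hrec
              obtain ⟨ha1, ha2, ha3, ha4⟩ := hrec
              refine ⟨by omega, ha2, ha3, fun c' h1 h2 hp => ?_⟩
              rcases eq_or_lt_of_le h1 with h | h
              · exact heq (h ▸ hp)
              · exact ha4 c' (by omega) h2 hp
      · simp only [loopA, if_neg hle]
        exact fun c h1 h2 _ => by omega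

theorem bsearchB_inv (req : Int) (rc : List Int) (m M : Int) :
    ∀ (fuel : Nat) (lo hi : Int) (ans : Option Int),
      (hi + 1 - lo).toNat ≤ fuel → m ≤ lo → hi ≤ M →
      (∀ c, m ≤ c → c < lo → ¬ (excessB c rc ≤ req)) →
      (match ans with
        | some a => m ≤ a ∧ a ≤ M ∧ excessB a rc ≤ req ∧ hi < a ∧
            (∀ c, hi < c → c < a → ¬ (excessB c rc ≤ req))
        | none => ∀ c, hi < c → c ≤ M → ¬ (excessB c rc ≤ req)) →
      IsAns m M (fun c => excessB c rc ≤ req) (bsearchB req rc lo hi ans fuel) := by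
  intro fuel
  induction fuel with
  | zero =>
      intro lo hi ans hf hml hhM Ia Ib
      have hlohi : hi < lo := by omega
      simp only [bsearchB]
      cases ans with
      | some a =>
          refine ⟨Ib.1, Ib.2.1, Ib.2.2.1, fun c h1 h2 hp => ?_⟩
          by_cases hc : c < lo
          · exact Ia c h1 hc hp
          · exact Ib.2.2.2.2 c (by omega) h2 hp
      | none =>
          intro c h1 h2 hp
          by_cases hc : c < lo
          · exact Ia c h1 hc hp
          · exact Ib c (by omega) h2 hp
  | succ fuel ih =>
      intro lo hi ans hf hml hhM Ia Ib
      by_cases hle : lo ≤ hi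
      · simp only [bsearchB, if_pos hle]
        have hmid := PySem.Int.floordiv_two_mid_bounds hle
        set mid := PySem.Int.floordiv (lo + hi) 2 with hmiddef
        by_cases hp : excessB mid rc ≤ req
        · simp only [if_pos hp]
          refine ih lo (mid - 1) (some mid) (by omega) hml (by omega) Ia
            ⟨by omega, by omega, hp, by omega, fun c h1 h2 => by omega⟩
        · simp only [if_neg hp]
          refine ih (mid + 1) hi ans (by omega) (by omega) hhM ?_ Ib
          intro c h1 h2 hc
          by_cases hcl : c < lo
          · exact Ia c h1 hcl hc
          · -- lo ≤ c ≤ mid, so excessB mid ≤ excessB c ≤ req, contradicting hp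
            apply hp
            calc excessB mid rc = fsum rc mid := excessB_eq _ _
              _ ≤ fsum rc c := fsum_antitone rc (by omega)
              _ = excessB c rc := (excessB_eq _ _).symm
              _ ≤ req := hc
      · simp only [bsearchB, if_neg hle]
        cases ans with
        | some a =>
            refine ⟨Ib.1, Ib.2.1, Ib.2.2.1, fun c h1 h2 hp => ?_⟩
            by_cases hc : c < lo
            · exact Ia c h1 hc hp
            · exact Ib.2.2.2.2 c (by omega) h2 hp
        | none =>
            intro c h1 h2 hp
            by_cases hc : c < lo
            · exact Ia c h1 hc hp
            · exact Ib c (by omega) h2 hp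

-- the final 'if ans is not None and excess == required' step of Source B, specified
theorem combine_some (m M req : Int) (rc : List Int) (a : Int)
    (hr : IsAns m M (fun c => fsum rc c ≤ req) (some a)) :
    IsAns m M (fun c => fsum rc c = req) (if fsum rc a = req then some a else none) := by
  by_cases heq : fsum rc a = req
  · simp only [if_pos heq]
    exact ⟨hr.1, hr.2.1, heq, fun c' h1 h2 hp => hr.2.2.2 c' h1 h2 (le_of_eq hp)⟩
  · simp only [if_neg heq]
    intro c h1 h2 hp
    by_cases hc : c < a
    · exact hr.2.2.2 c h1 hc (le_of_eq hp)
    · have h1' : fsum rc c ≤ fsum rc a := fsum_antitone rc (by omega)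
      have h2' : fsum rc a ≤ req := hr.2.2.1
      omega

theorem combine_none (m M req : Int) (rc : List Int)
    (hr : IsAns m M (fun c => fsum rc c ≤ req) none) :
    IsAns m M (fun c => fsum rc c = req) none :=
  fun c h1 h2 hp => hr c h1 h2 (le_of_eq hp)

theorem pairwise_le_getLast : ∀ (s : List Int) (h : s ≠ []),
    s.Pairwise (· ≤ ·) → ∀ x ∈ s, x ≤ s.getLast h := by
  intro s
  induction s with
  | nil => intro h; exact absurd rfl h
  | cons a t ih =>
      intro h hpw x hx
      cases t with
      | nil =>
          simp at hx
          simp [hx]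
      | cons b u =>
          rw [List.getLast_cons (by simp)]
          rcases List.mem_cons.mp hx with rfl | hx
          · have := List.getLast_mem (l := b :: u) (by simp)
            exact le_trans ((List.pairwise_cons.mp hpw).1 _ this) le_rfl
          · exact ih (by simp) (List.pairwise_cons.mp hpw).2 x hx

-- ===== VERDICT (by name: the statement is the Claim_ definition above) =====
theorem solve_cutter_height_spec : Claim_equal_solve_cutter_height := by
  intro req rc _hdom hpre
  unfold Spec_solve_cutter_height solve_cutter_height solveSortedA solve_cutter_height_alt
  have hperm : (PySem.List.sorted rc (fun x => x) false).Perm rc :=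
    PySem.List.sorted_perm rc (fun x => x) false
  set s := PySem.List.sorted rc (fun x => x) false with hs
  have hsne : s ≠ [] := by
    intro h
    have hp2 := hperm
    rw [h] at hp2
    exact hpre hp2.symm.eq_nil
  obtain ⟨first, t, hst⟩ := List.exists_cons_of_ne_nil hsne
  -- min and max of rc
  obtain ⟨m, hm⟩ : ∃ m, PySem.List.min? rc (fun x => x) = some m := by
    cases h : PySem.List.min? rc (fun x => x) with
    | none => exact absurd ((PySem.List.min?_eq_none_iff rc _).mp h) hpre
    | some m => exact ⟨m, rfl⟩
  obtain ⟨M, hM⟩ : ∃ M, PySem.List.max? rc (fun x => x) = some M := by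
    cases h : PySem.List.max? rc (fun x => x) with
    | none => exact absurd ((PySem.List.max?_eq_none_iff rc _).mp h) hpre
    | some M => exact ⟨M, rfl⟩
  have hmmem : m ∈ rc := PySem.List.min?_mem hm
  have hMmem : M ∈ rc := PySem.List.max?_mem hM
  have hmmin : ∀ y ∈ rc, m ≤ y := fun y hy => PySem.List.min?_isMin hm y hy
  have hMmax : ∀ y ∈ rc, y ≤ M := fun y hy => PySem.List.max?_isMax hM y hy
  -- s[0] = m
  have hfirst : first = m := by
    have h1 : ∀ y ∈ rc, first ≤ y :=
      PySem.List.key_head_sorted_le rc (fun x => x) (hs.symm.trans hst)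
    have h2 : first ∈ rc := hperm.mem_iff.mp (hst ▸ List.mem_cons_self)
    exact le_antisymm (h1 m hmmem) (hmmin first h2)
  -- s[-1] = M
  have hpw : s.Pairwise (· ≤ ·) := PySem.List.sorted_pairwise rc (fun x => x)
  have hlast : s.getLast hsne = M := by
    have h1 : s.getLast hsne ∈ rc := hperm.mem_iff.mp (List.getLast_mem hsne)
    have h2 : M ≤ s.getLast hsne :=
      pairwise_le_getLast s hsne hpw M (hperm.mem_iff.mpr hMmem)
    exact le_antisymm (hMmax _ h1) h2
  -- evaluate the indexings in port A
  have hget0 : PySem.List.pyGet? s 0 = some first := by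
    rw [hst]; exact PySem.List.pyGet?_zero_cons first t
  have hgetn1 : PySem.List.pyGet? s (-1) = some M := by
    rw [PySem.List.pyGet?_neg_one, List.getLast?_eq_some_getLast hsne, hlast]
  rw [hget0, hgetn1, hm, hM, hfirst]
  -- characterize A's result
  have hA : IsAns m M (fun c => fsum rc c = req)
      (loopA req s M m (M + 1 - m).toNat) := by
    have := loopA_char req s M (M + 1 - m).toNat m le_rfl
    exact IsAns_congr (fun c => by rw [fsum_perm hperm]) this
  -- characterize B's binary search
  have hB0 : IsAns m M (fun c => excessB c rc ≤ req)
      (bsearchB req rc m M none (M + 1 - m).toNat) := by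
    refine bsearchB_inv req rc m M (M + 1 - m).toNat m M none le_rfl le_rfl le_rfl
      (fun c h1 h2 => by omega) (fun c h1 h2 => by omega)
  have hB1 : IsAns m M (fun c => fsum rc c ≤ req)
      (bsearchB req rc m M none (M + 1 - m).toNat) :=
    IsAns_congr (fun c => by rw [excessB_eq]) hB0
  show loopA req s M m (M + 1 - m).toNat =
    (match bsearchB req rc m M none (M + 1 - m).toNat with
      | some a => if excessB a rc = req then some a else none
      | none => none)
  cases hbs : bsearchB req rc m M none (M + 1 - m).toNat with
  | none =>
      rw [hbs] at hB1
      exact IsAns_unique hA (combine_none m M req rc hB1)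
  | some a =>
      rw [hbs] at hB1
      show loopA req s M m (M + 1 - m).toNat =
        if excessB a rc = req then some a else none
      rw [excessB_eq]
      exact IsAns_unique hA (combine_some m M req rc a hB1)
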